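-- pv_equiv track=rewrite | github.com/MDAUBEITEMANYA/Homework | interview/three.py | find_two_characters
-- ===== SOURCE A (Python) =====
-- from typing import List
--
-- def find_two_characters(my_strings: List[str]):
--     character_dict = {}
--     character_list = []
--     if len(my_strings) < 2:
--         return None
--     my_doll = map(set, my_strings)
--     for i in my_doll:
--         for key in i:
--             if key in character_dict:
--                 character_dict[key] = character_dict[key] + 1
--             else:
--                 character_dict[key] = 1
--     for key in character_dict:
--         if character_dict[key] > 1:
--             character_list.append(key)
--     character_list.sort()
--     return character_list
-- ===== SOURCE B (Python) =====
-- def find_two_characters(my_strings):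
--     if len(my_strings) < 2:
--         return None
--     chars = sorted(ch for s in my_strings for ch in set(s))
--     result = []
--     prev = None
--     prev_dup = False
--     for c in chars:
--         if prev == c:
--             if not prev_dup:
--                 result.append(c)
--             prev_dup = True
--         else:
--             prev = c
--             prev_dup = False
--     return result
-- ===== Notes on version B (the rewrite author's own statement) =====
-- stated objective: alternative
-- what changed: Replaces A's hash-counting (a count dict filled by nested loops, then a filtering pass over its keys followed by a sort) with a sort-then-scan algorithm: flatten the per-string character sets into one list, sort it, and emit each character at the first adjacent duplicate of its run in a single linear scan, so no dictionary or counting exists at all.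
import Mathlib
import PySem

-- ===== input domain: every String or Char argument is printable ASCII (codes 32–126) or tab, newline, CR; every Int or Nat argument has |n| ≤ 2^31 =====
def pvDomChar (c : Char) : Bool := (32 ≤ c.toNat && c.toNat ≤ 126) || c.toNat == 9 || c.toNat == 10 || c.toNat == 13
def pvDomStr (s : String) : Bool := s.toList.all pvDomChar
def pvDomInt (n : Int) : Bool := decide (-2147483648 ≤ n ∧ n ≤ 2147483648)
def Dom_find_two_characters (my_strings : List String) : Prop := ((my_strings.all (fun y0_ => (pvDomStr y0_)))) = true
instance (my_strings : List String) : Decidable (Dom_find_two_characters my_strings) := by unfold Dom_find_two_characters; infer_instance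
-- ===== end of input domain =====

-- B replaces A's hash-counting (count dict + filtering pass + sort) with sort-then-scan:
-- flatten the per-string character sets, sort, and emit at the first adjacent duplicate
-- of each run in one linear scan; objective: alternative algorithm, same result.

-- ===== PORT A =====
-- set(s) for a Python string: the distinct one-character strings, first-occurrence order
def pvStrSet (s : String) : PySem.Set String :=
  PySem.Set.ofList (s.toList.map (fun c => String.singleton c))

def find_two_characters (my_strings : List String) : Option (List String) :=
  if my_strings.length < 2 then none
  else
    let my_doll := my_strings.map pvStrSet
    let character_dict : PySem.Dict String Int :=
      my_doll.foldl (fun d i =>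
        i.foldl (fun d key =>
          if d.contains key then d.insert key (d.getD key 0 + 1)
          else d.insert key 1) d) PySem.Dict.empty
    let character_list :=
      character_dict.keys.foldl (fun acc key =>
        if character_dict.getD key 0 > 1 then acc ++ [key] else acc) []
    some (PySem.List.sorted character_list (fun x => x) false)

-- ===== PORT B =====
-- scan state: (result, prev, prev_dup); `prev == c` with prev = None is False in Python
def find_two_characters_alt (my_strings : List String) : Option (List String) :=
  if my_strings.length < 2 then none
  else
    let chars := PySem.List.sorted (my_strings.flatMap (fun s => (pvStrSet s : List String)))
      (fun x => x) false
    let st : List String × Option String × Bool :=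
      chars.foldl (fun st c =>
        if st.2.1 = some c then
          (if st.2.2 then st.1 else st.1 ++ [c], st.2.1, true)
        else
          (st.1, some c, false)) ([], none, false)
    some st.1

-- ===== PRECONDITION & SPEC =====
def Spec_find_two_characters (my_strings : List String) (out : Option (List String)) : Prop := out = find_two_characters_alt my_strings
instance (my_strings : List String) (out : Option (List String)) : Decidable (Spec_find_two_characters my_strings out) := by unfold Spec_find_two_characters; infer_instance

-- ===== CLAIM (what is proved, stated in full; the proofs are below) =====
def Claim_equal_find_two_characters : Prop := ∀ (my_strings : List String), Dom_find_two_characters my_strings → Spec_find_two_characters my_strings (find_two_characters my_strings)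

-- ===== LEMMAS AND PROOFS =====

-- occurrence count: in how many of the strings does character c occur
def pvOcc (c : String) (l : List String) : Nat := l.countP (fun s => decide (c ∈ pvStrSet s))

-- A's dict step
def pvStepA (d : PySem.Dict String Int) (key : String) : PySem.Dict String Int :=
  if d.contains key then d.insert key (d.getD key 0 + 1) else d.insert key 1

-- B's scan step
def pvStepB (st : List String × Option String × Bool) (c : String) :
    List String × Option String × Bool :=
  if st.2.1 = some c then
    (if st.2.2 then st.1 else st.1 ++ [c], st.2.1, true)
  else
    (st.1, some c, false)

theorem pvStepA_getD (d : PySem.Dict String Int) (k c : String) :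
    (pvStepA d k).getD c 0 = if k = c then d.getD c 0 + 1 else d.getD c 0 := by
  unfold pvStepA
  by_cases h : d.contains k = true
  · rw [if_pos h, PySem.Dict.getD_insert]
    by_cases hk : c = k
    · rw [if_pos hk, if_pos hk.symm, hk]
    · rw [if_neg hk, if_neg (fun hh : k = c => hk hh.symm)]
  · have h0 : d.getD k 0 = 0 := by
      have hn : d.get? k = none :=
        (PySem.Dict.get?_eq_none_iff_not_mem_keys d k).mpr
          (fun hm => h ((PySem.Dict.contains_iff_mem_keys d k).mpr hm))
      simp [PySem.Dict.getD, hn]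
    rw [if_neg h, PySem.Dict.getD_insert]
    by_cases hk : c = k
    · rw [if_pos hk, if_pos hk.symm, hk, h0]; omega
    · rw [if_neg hk, if_neg (fun hh : k = c => hk hh.symm)]

theorem pvStepA_keys (d : PySem.Dict String Int) (k : String) :
    (pvStepA d k).keys = PySem.Set.add d.keys k := by
  unfold pvStepA PySem.Set.add
  by_cases h : d.contains k = true
  · rw [if_pos h, PySem.Dict.keys_insert_of_contains d _ h,
      if_pos ((PySem.Set.contains_iff _ _).mpr ((PySem.Dict.contains_iff_mem_keys d k).mp h))]
  · have hb : d.contains k = false := by simpa using h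
    rw [if_neg h, PySem.Dict.keys_insert_of_not_contains d _ hb,
      if_neg (fun hc => h ((PySem.Dict.contains_iff_mem_keys d k).mpr
        ((PySem.Set.contains_iff _ _).mp hc)))]

-- inner A loop over a character list: counts add, keys accumulate
theorem pvInnerA_getD (ks : List String) (d : PySem.Dict String Int) (c : String) :
    (ks.foldl pvStepA d).getD c 0 = d.getD c 0 + (ks.count c : Int) := by
  induction ks generalizing d with
  | nil => simp
  | cons k ks ih =>
    simp only [List.foldl_cons, ih, pvStepA_getD, List.count_cons]
    by_cases h : k = c
    · simp [h]; ring
    · simp [fun hh : k = c => h hh]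

theorem pvInnerA_keys (ks : List String) (d : PySem.Dict String Int) :
    (ks.foldl pvStepA d).keys = PySem.Set.update d.keys ks := by
  induction ks generalizing d with
  | nil => simp [PySem.Set.update]
  | cons k ks ih => simp [List.foldl_cons, ih, pvStepA_keys, PySem.Set.update]

-- outer A loop: the dict counts pvOcc, and its keys are the chars with pvOcc ≥ 1
theorem pvOuterA_getD (l : List String) (c : String) :
    ((l.map pvStrSet).foldl (fun d i => i.foldl pvStepA d) PySem.Dict.empty).getD c 0
      = (pvOcc c l : Int) := by
  induction l using List.reverseRecOn with
  | nil => simp [pvOcc]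
  | append_singleton l s ih =>
    have hnd : (pvStrSet s).Nodup := PySem.Set.nodup_ofList _
    simp only [List.map_append, List.foldl_append, List.map_cons, List.map_nil,
      List.foldl_cons, List.foldl_nil, pvInnerA_getD, ih, pvOcc, List.countP_append]
    have : (pvStrSet s).count c = if c ∈ pvStrSet s then 1 else 0 := by
      split_ifs with h
      · exact List.count_eq_one_of_mem hnd h
      · exact List.count_eq_zero_of_not_mem h
    rw [this]
    simp only [List.countP_cons, List.countP_nil]
    by_cases h : c ∈ pvStrSet s <;> simp [h]

theorem pvOuterA_keys_mem (l : List String) (c : String) :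
    c ∈ ((l.map pvStrSet).foldl (fun d i => i.foldl pvStepA d) PySem.Dict.empty).keys
      ↔ 1 ≤ pvOcc c l := by
  induction l using List.reverseRecOn with
  | nil => simp [pvOcc, PySem.Dict.empty]
  | append_singleton l s ih =>
    simp only [List.map_append, List.foldl_append, List.map_cons, List.map_nil,
      List.foldl_cons, List.foldl_nil, pvInnerA_keys, PySem.Set.mem_update, ih,
      pvOcc, List.countP_append, List.countP_cons, List.countP_nil]
    constructor
    · rintro (h | h)
      · omega
      · simp [h]
    · intro h
      by_cases hm : c ∈ pvStrSet s
      · right; exact hm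
      · left; simp [hm] at h ⊢; omega

theorem pvOuterA_keys_nodup (l : List String) :
    ((l.map pvStrSet).foldl (fun d i => i.foldl pvStepA d) PySem.Dict.empty).keys.Nodup := by
  induction l using List.reverseRecOn with
  | nil => simp [PySem.Dict.empty]
  | append_singleton l s ih =>
    simp only [List.map_append, List.foldl_append, List.map_cons, List.map_nil,
      List.foldl_cons, List.foldl_nil, pvInnerA_keys]
    exact PySem.Set.nodup_update _ _ ih

-- the flattened character multiset counts pvOcc
theorem pvFlat_count (l : List String) (c : String) :
    (l.flatMap (fun s => (pvStrSet s : List String))).count c = pvOcc c l := by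
  induction l with
  | nil => simp [pvOcc]
  | cons s l ih =>
    have hnd : (pvStrSet s).Nodup := PySem.Set.nodup_ofList _
    simp only [List.flatMap_cons, List.count_append, ih, pvOcc, List.countP_cons]
    by_cases h : c ∈ pvStrSet s
    · rw [List.count_eq_one_of_mem hnd h]; simp [h, Nat.add_comm]
    · rw [List.count_eq_zero_of_not_mem h]; simp [h]

-- B's scan over a sorted tail, from state (res, some v, dup)
theorem pvScan_spec (xs : List String) (res : List String) (v : String) (dup : Bool)
    (hs : xs.Pairwise (· ≤ ·)) (hv : ∀ x ∈ xs, v ≤ x)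
    (hres : res.Pairwise (· < ·)) (hle : ∀ c ∈ res, c ≤ v)
    (hlt : dup = false → ∀ c ∈ res, c < v) :
    (xs.foldl pvStepB (res, some v, dup)).1.Pairwise (· < ·) ∧
    (∀ c, c ∈ (xs.foldl pvStepB (res, some v, dup)).1 ↔
      c ∈ res ∨ (c = v ∧ dup = false ∧ v ∈ xs) ∨ (c ≠ v ∧ 2 ≤ xs.count c)) := by
  induction xs generalizing res v dup with
  | nil =>
    refine ⟨hres, fun c => ?_⟩
    simp
  | cons x xs ih =>
    have hs' : xs.Pairwise (· ≤ ·) := hs.tail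
    have hx : ∀ y ∈ xs, x ≤ y := fun y hy => (List.pairwise_cons.mp hs).1 y hy
    have hvx : v ≤ x := hv x (List.mem_cons_self)
    rw [List.foldl_cons]
    by_cases hxv : x = v
    · subst hxv
      cases dup with
      | true =>
        have hstep : pvStepB (res, some x, true) x = (res, some x, true) := by
          simp [pvStepB]
        rw [hstep]
        obtain ⟨h1, h2⟩ := ih res x true hs' hx hres hle (by intro h; cases h)
        refine ⟨h1, fun c => ?_⟩
        rw [h2 c]
        constructor
        · rintro (h | ⟨h, hf, _⟩ | ⟨h, h'⟩)
          · exact Or.inl h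
          · cases hf
          · exact Or.inr (Or.inr ⟨h, by rw [List.count_cons]; omega⟩)
        · rintro (h | ⟨_, hf, _⟩ | ⟨h, h'⟩)
          · exact Or.inl h
          · cases hf
          · refine Or.inr (Or.inr ⟨h, ?_⟩)
            rw [List.count_cons, if_neg (by simp [(Ne.symm h : x ≠ c)])] at h'
            omega
      | false =>
        have hstep : pvStepB (res, some x, false) x = (res ++ [x], some x, true) := by
          simp [pvStepB]
        rw [hstep]
        have hres' : (res ++ [x]).Pairwise (· < ·) := by
          rw [List.pairwise_append]
          exact ⟨hres, List.pairwise_singleton _ _,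
            fun a ha b hb => by rw [List.mem_singleton] at hb; subst hb; exact hlt rfl a ha⟩
        have hle' : ∀ c ∈ res ++ [x], c ≤ x := by
          intro c hc
          rcases List.mem_append.mp hc with h | h
          · exact hle c h
          · rw [List.mem_singleton] at h; subst h; exact le_refl _
        obtain ⟨h1, h2⟩ := ih (res ++ [x]) x true hs' hx hres' hle' (by intro h; cases h)
        refine ⟨h1, fun c => ?_⟩
        rw [h2 c]
        constructor
        · rintro (h | ⟨_, hf, _⟩ | ⟨h, h'⟩)
          · rcases List.mem_append.mp h with h | h
            · exact Or.inl h
            · rw [List.mem_singleton] at h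
              exact Or.inr (Or.inl ⟨h, rfl, List.mem_cons_self⟩)
          · cases hf
          · exact Or.inr (Or.inr ⟨h, by rw [List.count_cons]; omega⟩)
        · rintro (h | ⟨h, _, _⟩ | ⟨h, h'⟩)
          · exact Or.inl (List.mem_append.mpr (Or.inl h))
          · exact Or.inl (List.mem_append.mpr (Or.inr (by simp [h])))
          · refine Or.inr (Or.inr ⟨h, ?_⟩)
            rw [List.count_cons, if_neg (by simp [(Ne.symm h : x ≠ c)])] at h'
            omega
    · have hvltx : v < x := lt_of_le_of_ne hvx (fun h => hxv h.symm)
      have hne : v ≠ x := fun h => hxv h.symm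
      have hstep : pvStepB (res, some v, dup) x = (res, some x, false) := by
        simp [pvStepB, hne]
      rw [hstep]
      have hle' : ∀ c ∈ res, c ≤ x := fun c hc => le_of_lt (lt_of_le_of_lt (hle c hc) hvltx)
      have hlt' : (false : Bool) = false → ∀ c ∈ res, c < x :=
        fun _ c hc => lt_of_le_of_lt (hle c hc) hvltx
      obtain ⟨h1, h2⟩ := ih res x false hs' hx hres hle' hlt'
      have hvnx : v ∉ xs := fun hm => absurd (hx v hm) (not_le.mpr hvltx)
      refine ⟨h1, fun c => ?_⟩
      rw [h2 c]
      constructor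
      · rintro (h | ⟨h, _, h'⟩ | ⟨h, h'⟩)
        · exact Or.inl h
        · subst h
          refine Or.inr (Or.inr ⟨hxv, ?_⟩)
          rw [List.count_cons, if_pos (by simp)]
          have : 1 ≤ xs.count c := List.count_pos_iff.mpr h'
          omega
        · by_cases hcv : c = v
          · subst hcv
            rw [List.count_eq_zero_of_not_mem hvnx] at h'
            omega
          · refine Or.inr (Or.inr ⟨hcv, ?_⟩)
            rw [List.count_cons]; omega
      · rintro (h | ⟨h, _, hm⟩ | ⟨h, h'⟩)
        · exact Or.inl h
        · subst h
          rcases List.mem_cons.mp hm with h | h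
          · exact absurd h.symm hxv
          · exact absurd h hvnx
        · rw [List.count_cons] at h'
          by_cases hcx : c = x
          · subst hcx
            rw [if_pos (by simp)] at h'
            refine Or.inr (Or.inl ⟨rfl, rfl, ?_⟩)
            exact List.count_pos_iff.mp (by omega)
          · rw [if_neg (by simp [(Ne.symm hcx : x ≠ c)])] at h'
            refine Or.inr (Or.inr ⟨hcx, ?_⟩)
            omega

-- B's full scan over a sorted list: output is strictly increasing, membership = count ≥ 2
theorem pvScan_full (chars : List String) (hs : chars.Pairwise (· ≤ ·)) :
    (chars.foldl pvStepB ([], none, false)).1.Pairwise (· < ·) ∧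
    (∀ c, c ∈ (chars.foldl pvStepB ([], none, false)).1 ↔ 2 ≤ chars.count c) := by
  cases chars with
  | nil => refine ⟨List.Pairwise.nil, fun c => ?_⟩; simp
  | cons h t =>
    have hstep : pvStepB ([], none, false) h = ([], some h, false) := by
      simp [pvStepB]
    rw [List.foldl_cons, hstep]
    have ht : t.Pairwise (· ≤ ·) := hs.tail
    have hh : ∀ x ∈ t, h ≤ x := fun x hx => (List.pairwise_cons.mp hs).1 x hx
    obtain ⟨h1, h2⟩ := pvScan_spec t [] h false ht hh List.Pairwise.nil
      (by intro c hc; cases hc) (by intro _ c hc; cases hc)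
    refine ⟨h1, fun c => ?_⟩
    rw [h2 c]
    rw [List.count_cons]
    constructor
    · rintro (hc | ⟨hc, _, hm⟩ | ⟨hc, hc'⟩)
      · cases hc
      · subst hc
        rw [if_pos (by simp)]
        have : 1 ≤ t.count c := List.count_pos_iff.mpr hm
        omega
      · rw [if_neg (by simp [(Ne.symm hc : h ≠ c)])]
        omega
    · intro hc
      by_cases hch : c = h
      · subst hch
        rw [if_pos (by simp)] at hc
        exact Or.inr (Or.inl ⟨rfl, rfl, List.count_pos_iff.mp (by omega)⟩)
      · rw [if_neg (by simp [(Ne.symm hch : h ≠ c)])] at hc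
        exact Or.inr (Or.inr ⟨hch, by omega⟩)

-- ===== VERDICT (by name: the statement is the Claim_ definition above) =====
theorem find_two_characters_spec : Claim_equal_find_two_characters := by
  intro l _
  unfold Spec_find_two_characters find_two_characters find_two_characters_alt
  by_cases hlen : l.length < 2
  · rw [if_pos hlen, if_pos hlen]
  · rw [if_neg hlen, if_neg hlen]
    dsimp only
    congr 1
    have hfoldA : (l.map pvStrSet).foldl (fun d i => i.foldl (fun d key =>
          if d.contains key then d.insert key (d.getD key 0 + 1)
          else d.insert key 1) d) PySem.Dict.empty
        = (l.map pvStrSet).foldl (fun d i => i.foldl pvStepA d) PySem.Dict.empty := rfl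
    rw [hfoldA]
    set D := (l.map pvStrSet).foldl (fun d i => i.foldl pvStepA d) PySem.Dict.empty with hD
    set chars := PySem.List.sorted (l.flatMap (fun s => (pvStrSet s : List String)))
      (fun x => x) false with hchars
    have hfoldB : chars.foldl (fun (st : List String × Option String × Bool) c =>
          if st.2.1 = some c then
            (if st.2.2 then st.1 else st.1 ++ [c], st.2.1, true)
          else (st.1, some c, false)) ([], none, false)
        = chars.foldl pvStepB ([], none, false) := rfl
    rw [hfoldB]
    rw [PySem.List.foldl_append_ite_eq_filter]
    have hsorted : chars.Pairwise (· ≤ ·) := by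
      have := PySem.List.sorted_pairwise (l.flatMap (fun s => (pvStrSet s : List String)))
        (fun x => x)
      simpa using this
    obtain ⟨hB1, hB2⟩ := pvScan_full chars hsorted
    have hcount : ∀ c, chars.count c = pvOcc c l := by
      intro c
      rw [hchars, (PySem.List.sorted_perm _ _ _).count_eq, pvFlat_count]
    -- both sides: sorted of a list whose members are exactly {c | pvOcc c l ≥ 2}
    refine PySem.List.sorted_eq_of_perm_of_pairwise_lt _ _ _ ?_ hB1
    apply (List.perm_ext_iff_of_nodup
      (hB1.imp (fun h => ne_of_lt h))
      (List.Nodup.filter _ (by rw [hD]; exact pvOuterA_keys_nodup l))).mpr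
    intro c
    rw [List.mem_filter, hB2 c, hcount c, hD]
    simp only [pvOuterA_keys_mem, pvOuterA_getD, decide_eq_true_eq]
    constructor
    · intro h
      exact ⟨by omega, by omega⟩
    · rintro ⟨_, h2⟩
      omega
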